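-- pv_equiv track=rewrite | github.com/ifnodoraemon/dora-code | src/core/agent_loop.py | determine_phase
-- ===== SOURCE A (Python) =====
-- from enum import Enum
--
-- class AgentPhase(str, Enum):
--     """High-level intent, not a hard workflow state."""
--
--     GATHERING = "gathering"
--     EDITING = "editing"
--     VERIFYING = "verifying"
--     FINISHING = "finishing"
--
-- READ_LIKE_TOOLS = {
--     "read",
--     "search",
--     "semantic_search",
--     "web_search",
--     "browse_page",
--     "take_screenshot",
--     "fetch_url",
--     "db_read_query",
--     "db_list_tables",
--     "db_describe_table",
--     "search_notes",
--     "ask_user",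
-- }
--
-- WRITE_LIKE_TOOLS = {
--     "write",
--     "run",
--     "db_write_query",
--     "github_create_issue",
--     "save_note",
-- }
--
-- def determine_phase(
--
--     pending_tool_names: list[str],
--     files_modified: set[str],
--     verification_performed: bool,
--     response_has_tool_calls: bool,
-- ) -> AgentPhase:
--     """Infer the current intent from pending work and recent outcomes."""
--     if any(name in WRITE_LIKE_TOOLS for name in pending_tool_names):
--         if all(name == "run" for name in pending_tool_names):
--             return AgentPhase.VERIFYING
--         return AgentPhase.EDITING
--
--     if pending_tool_names:
--         if all(name in READ_LIKE_TOOLS for name in pending_tool_names):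
--             return AgentPhase.GATHERING
--         if any(name == "run" for name in pending_tool_names):
--             return AgentPhase.VERIFYING
--
--     if files_modified and not verification_performed:
--         return AgentPhase.VERIFYING
--
--     if not response_has_tool_calls:
--         return AgentPhase.FINISHING
--
--     return AgentPhase.GATHERING
-- ===== SOURCE B (Python) =====
-- from enum import Enum
--
-- class AgentPhase(str, Enum):
--     GATHERING = "gathering"
--     EDITING = "editing"
--     VERIFYING = "verifying"
--     FINISHING = "finishing"
--
-- READ_LIKE_TOOLS = {
--     "read", "search", "semantic_search", "web_search", "browse_page",
--     "take_screenshot", "fetch_url", "db_read_query", "db_list_tables",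
--     "db_describe_table", "search_notes", "ask_user",
-- }
--
-- WRITE_LIKE_TOOLS = {"write", "run", "db_write_query", "github_create_issue", "save_note"}
--
-- def determine_phase(
--     pending_tool_names: list[str],
--     files_modified: set[str],
--     verification_performed: bool,
--     response_has_tool_calls: bool,
-- ) -> AgentPhase:
--     # One pass: count pending names per category, then branch on the counters.
--     n = writes = runs = reads = 0
--     for name in pending_tool_names:
--         n += 1
--         if name in WRITE_LIKE_TOOLS:
--             writes += 1
--         if name == "run":
--             runs += 1
--         if name in READ_LIKE_TOOLS:
--             reads += 1
--
--     if writes > 0: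
--         return AgentPhase.VERIFYING if runs == n else AgentPhase.EDITING
--     if n > 0 and reads == n:
--         return AgentPhase.GATHERING
--     # (any 'run' pending implies writes > 0, already handled above)
--     if files_modified and not verification_performed:
--         return AgentPhase.VERIFYING
--     if not response_has_tool_calls:
--         return AgentPhase.FINISHING
--     return AgentPhase.GATHERING
-- ===== Notes on version B (the rewrite author's own statement) =====
-- stated objective: alternative
-- what changed: B replaces A's four separate any/all scans over pending_tool_names with one counting pass (length, write-like, run, read-like counters) and then branches on the counters only, dropping A's dead 'any run' branch (a pending 'run' always hits the write-like branch first).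
import Mathlib
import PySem

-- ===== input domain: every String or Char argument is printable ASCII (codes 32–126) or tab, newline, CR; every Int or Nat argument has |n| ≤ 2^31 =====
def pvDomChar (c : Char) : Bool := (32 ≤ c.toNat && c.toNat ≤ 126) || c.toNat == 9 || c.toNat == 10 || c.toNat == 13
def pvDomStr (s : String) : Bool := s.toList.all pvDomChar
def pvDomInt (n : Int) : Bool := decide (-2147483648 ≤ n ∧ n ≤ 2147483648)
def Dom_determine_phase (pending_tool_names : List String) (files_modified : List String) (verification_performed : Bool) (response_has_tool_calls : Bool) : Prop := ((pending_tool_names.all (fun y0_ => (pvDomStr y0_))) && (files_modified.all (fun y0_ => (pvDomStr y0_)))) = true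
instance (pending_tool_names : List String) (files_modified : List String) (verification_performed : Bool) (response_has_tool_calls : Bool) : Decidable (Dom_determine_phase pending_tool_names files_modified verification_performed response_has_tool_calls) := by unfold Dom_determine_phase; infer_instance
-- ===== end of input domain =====

-- B replaces A's four separate any/all scans of pending_tool_names with one counting pass plus scalar branching (and drops A's unreachable "any run" branch); objective: alternative decomposition, same O(n) cost.


-- ===== PORT A =====
def READ_LIKE_TOOLS : List String :=
  ["read", "search", "semantic_search", "web_search", "browse_page",
   "take_screenshot", "fetch_url", "db_read_query", "db_list_tables",
   "db_describe_table", "search_notes", "ask_user"]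

def WRITE_LIKE_TOOLS : List String :=
  ["write", "run", "db_write_query", "github_create_issue", "save_note"]

def determine_phase (pending_tool_names : List String) (files_modified : List String) (verification_performed : Bool) (response_has_tool_calls : Bool) : String :=
  if pending_tool_names.any (fun name => WRITE_LIKE_TOOLS.contains name) then
    (if pending_tool_names.all (fun name => name == "run") then "verifying" else "editing")
  else if !pending_tool_names.isEmpty && pending_tool_names.all (fun name => READ_LIKE_TOOLS.contains name) then
    "gathering"
  else if !pending_tool_names.isEmpty && pending_tool_names.any (fun name => name == "run") then
    "verifying"
  else if !files_modified.isEmpty && !verification_performed then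
    "verifying"
  else if !response_has_tool_calls then
    "finishing"
  else
    "gathering"

-- ===== PORT B =====
def determine_phase_alt (pending_tool_names : List String) (files_modified : List String) (verification_performed : Bool) (response_has_tool_calls : Bool) : String :=
  -- one counting pass over pending_tool_names, then branch on the counters
  let st : Nat × Nat × Nat × Nat :=
    pending_tool_names.foldl
      (fun acc name =>
        (acc.1 + 1,
         acc.2.1 + (if WRITE_LIKE_TOOLS.contains name then 1 else 0),
         acc.2.2.1 + (if name == "run" then 1 else 0),
         acc.2.2.2 + (if READ_LIKE_TOOLS.contains name then 1 else 0)))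
      (0, 0, 0, 0)
  let n := st.1
  let writes := st.2.1
  let runs := st.2.2.1
  let reads := st.2.2.2
  if writes > 0 then
    (if runs == n then "verifying" else "editing")
  else if n > 0 && reads == n then
    "gathering"
  else if !files_modified.isEmpty && !verification_performed then
    "verifying"
  else if !response_has_tool_calls then
    "finishing"
  else
    "gathering"

-- ===== PRECONDITION & SPEC =====
def Spec_determine_phase (pending_tool_names : List String) (files_modified : List String) (verification_performed : Bool) (response_has_tool_calls : Bool) (out : String) : Prop := out = determine_phase_alt pending_tool_names files_modified verification_performed response_has_tool_calls
instance (pending_tool_names : List String) (files_modified : List String) (verification_performed : Bool) (response_has_tool_calls : Bool) (out : String) : Decidable (Spec_determine_phase pending_tool_names files_modified verification_performed response_has_tool_calls out) := by unfold Spec_determine_phase; infer_instance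

-- ===== CLAIM (what is proved, stated in full; the proofs are below) =====
def Claim_equal_determine_phase : Prop := ∀ (pending_tool_names : List String) (files_modified : List String) (verification_performed : Bool) (response_has_tool_calls : Bool), Dom_determine_phase pending_tool_names files_modified verification_performed response_has_tool_calls → Spec_determine_phase pending_tool_names files_modified verification_performed response_has_tool_calls (determine_phase pending_tool_names files_modified verification_performed response_has_tool_calls)

-- ===== LEMMAS AND PROOFS =====

-- ===== VERDICT (by name: the statement is the Claim_ definition above) =====
-- counters lemma: the fold computes (length, countP write-like, countP run, countP read-like)
theorem dp_fold_counts (p : List String) (a b c d : Nat) :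
    p.foldl
      (fun (acc : Nat × Nat × Nat × Nat) name =>
        (acc.1 + 1,
         acc.2.1 + (if WRITE_LIKE_TOOLS.contains name then 1 else 0),
         acc.2.2.1 + (if name == "run" then 1 else 0),
         acc.2.2.2 + (if READ_LIKE_TOOLS.contains name then 1 else 0)))
      (a, b, c, d)
    = (a + p.length,
       b + p.countP (fun name => WRITE_LIKE_TOOLS.contains name),
       c + p.countP (fun name => name == "run"),
       d + p.countP (fun name => READ_LIKE_TOOLS.contains name)) := by
  induction p generalizing a b c d with
  | nil => simp
  | cons x xs ih =>
    simp only [List.foldl_cons, List.length_cons, List.countP_cons, ih]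
    split_ifs <;> simp <;> omega

theorem dp_any_iff (p : List String) (q : String → Bool) :
    p.any q = true ↔ 0 < p.countP q := by
  rw [List.any_eq_true, List.countP_pos_iff]

theorem dp_all_iff (p : List String) (q : String → Bool) :
    p.all q = true ↔ p.countP q = p.length := by
  rw [List.all_eq_true, List.countP_eq_length]

-- a pending "run" is write-like
theorem dp_run_write (p : List String) (h : p.any (fun name => name == "run") = true) :
    p.any (fun name => WRITE_LIKE_TOOLS.contains name) = true := by
  rw [List.any_eq_true] at h ⊢
  obtain ⟨x, hx, he⟩ := h
  exact ⟨x, hx, by simp_all [WRITE_LIKE_TOOLS]⟩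

theorem determine_phase_spec : Claim_equal_determine_phase := by
  intro p f v r _
  unfold Spec_determine_phase determine_phase determine_phase_alt
  simp only [dp_fold_counts, Nat.zero_add]
  by_cases hw : p.any (fun name => WRITE_LIKE_TOOLS.contains name) = true
  · have hw' : 0 < p.countP (fun name => WRITE_LIKE_TOOLS.contains name) :=
      (dp_any_iff _ _).mp hw
    simp only [hw, if_pos, hw']
    by_cases hr : p.all (fun name => name == "run") = true
    · have := (dp_all_iff p (fun name => name == "run")).mp hr
      simp [hw, hw', hr, this]
    · have : ¬ p.countP (fun name => name == "run") = p.length := fun h =>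
        hr ((dp_all_iff _ _).mpr h)
      simp [hw, hw', hr, this]
  · have hw' : ¬ 0 < p.countP (fun name => WRITE_LIKE_TOOLS.contains name) := fun h =>
      hw ((dp_any_iff _ _).mpr h)
    have hrun : p.any (fun name => name == "run") = false := by
      by_contra h
      exact hw (dp_run_write p (by simpa using h))
    by_cases hne : p.isEmpty
    · have hp : p = [] := List.isEmpty_iff.mp hne
      subst hp; simp
    · by_cases hall : p.all (fun name => READ_LIKE_TOOLS.contains name) = true
      · have := (dp_all_iff p (fun name => READ_LIKE_TOOLS.contains name)).mp hall
        have hlen : 0 < p.length := by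
          cases p with
          | nil => simp at hne
          | cons _ _ => simp
        simp [hw, hw', hne, hall, hrun, this, hlen]
      · have : ¬ p.countP (fun name => READ_LIKE_TOOLS.contains name) = p.length := fun h =>
          hall ((dp_all_iff _ _).mpr h)
        have hall' : ¬ ∀ x ∈ p, x ∈ READ_LIKE_TOOLS := by simpa using hall
        simp [hw, hne, hall', hrun, this]
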